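-- pv_equiv track=rewrite | github.com/bernardoacosta/SPLN2324 | TPC1/p1/word_freq/__init__.py | consolidate_counts
-- ===== SOURCE A (Python) =====
-- from collections import Counter
--
-- def consolidate_counts(words):
--
--     case_insensitive_count = Counter(word.lower() for word in words)
--     preferred_forms = {}
--
--     for word, _ in case_insensitive_count.items():
--         capitalized_form = word.capitalize()
--         lowercase_form = word.lower()
--         cap_count = words.get(capitalized_form, 0)
--         low_count = words.get(lowercase_form, 0)
--         if cap_count >= low_count:
--             preferred_forms[word] = capitalized_form
--         else:
--             preferred_forms[word] = lowercase_form
--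
--     consolidated_counts = {}
--     for word, count in words.items():
--         preferred_form = preferred_forms[word.lower()]
--         consolidated_counts[preferred_form] = consolidated_counts.get(preferred_form, 0) + count
--
--     return consolidated_counts
-- ===== SOURCE B (Python) =====
-- def consolidate_counts(words):
--     # brute force alternative: at each first occurrence of a lowercase form,
--     # rescan words to sum that group's counts and emit the preferred form directly
--     seen = set()
--     consolidated = {}
--     for w in words:
--         L = w.lower()
--         if L in seen:
--             continue
--         seen.add(L)
--         total = sum(c for x, c in words.items() if x.lower() == L)
--         cap = L.capitalize()
--         preferred = cap if words.get(cap, 0) >= words.get(L, 0) else L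
--         consolidated[preferred] = total
--     return consolidated
-- ===== Notes on version B (the rewrite author's own statement) =====
-- stated objective: alternative
-- what changed: B drops all of A's dicts (Counter, preferred_forms, grouped re-aggregation): it keeps only a seen-set and, at each first occurrence of a lowercase form, rescans the whole input to sum that group's counts and emits the preferred capitalization directly; it trades A's hash-based linear passes for a quadratic nested scan with no intermediate index. Pre_ only excludes association lists with duplicate keys, which do not represent a Python dict argument.
import Mathlib
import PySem

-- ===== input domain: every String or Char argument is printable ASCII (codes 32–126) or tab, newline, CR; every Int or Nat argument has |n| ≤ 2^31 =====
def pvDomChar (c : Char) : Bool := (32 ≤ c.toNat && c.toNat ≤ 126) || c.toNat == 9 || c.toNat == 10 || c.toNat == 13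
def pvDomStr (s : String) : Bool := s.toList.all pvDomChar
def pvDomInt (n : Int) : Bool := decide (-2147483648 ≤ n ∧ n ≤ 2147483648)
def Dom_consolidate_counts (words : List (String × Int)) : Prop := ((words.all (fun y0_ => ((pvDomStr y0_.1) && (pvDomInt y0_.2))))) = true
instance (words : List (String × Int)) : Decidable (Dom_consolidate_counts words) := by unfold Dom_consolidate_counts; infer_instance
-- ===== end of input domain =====

-- B replaces A's Counter + preferred_forms dict + re-aggregation pass with a seen-set
-- nested scan: at each first occurrence of a lowercase form it rescans the input to sum
-- that group's counts and emits the preferred form directly; objective: alternative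
-- algorithm (no intermediate index, quadratic instead of hash-based passes).


-- ===== PORT A =====
-- Python str.capitalize: first character upper-cased, the rest lower-cased (exact on ASCII,
-- where title-casing a single character is upper-casing it).
def pyCapitalize (s : String) : String :=
  match s.toList with
  | [] => ""
  | c :: cs => String.ofList (PySem.Chars.upperChar c :: PySem.Chars.lower cs)

def consolidate_counts (words : List (String × Int)) : List (String × Int) :=
  let d := PySem.Dict.mk words
  let case_insensitive_count : PySem.Dict String Int :=
    PySem.Dict.counter (words.map (fun p => PySem.Str.lower p.1))
  let preferred_forms : PySem.Dict String String :=
    case_insensitive_count.items.foldl (fun pf wc =>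
      let word := wc.1
      let capitalized_form := pyCapitalize word
      let lowercase_form := PySem.Str.lower word
      let cap_count := d.getD capitalized_form 0
      let low_count := d.getD lowercase_form 0
      if cap_count ≥ low_count then pf.insert word capitalized_form
      else pf.insert word lowercase_form) PySem.Dict.empty
  let consolidated_counts : PySem.Dict String Int :=
    words.foldl (fun cc p =>
      -- preferred_forms[word.lower()]: the key is always present (every lowered word is a
      -- key of case_insensitive_count), so Python's [] never raises; getD "" is exact here
      let preferred_form := (preferred_forms.get? (PySem.Str.lower p.1)).getD ""
      cc.insert preferred_form (cc.getD preferred_form 0 + p.2)) PySem.Dict.empty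
  consolidated_counts.items

-- ===== PORT B =====
def consolidate_counts_alt (words : List (String × Int)) : List (String × Int) :=
  let d := PySem.Dict.mk words
  let final := words.foldl
    (fun (acc : PySem.Set String × PySem.Dict String Int) w =>
      let L := PySem.Str.lower w.1
      if PySem.Set.contains acc.1 L then acc
      else
        let seen := PySem.Set.add acc.1 L
        -- sum(c for x, c in words.items() if x.lower() == L)
        let total := words.foldl (fun s x => if PySem.Str.lower x.1 == L then s + x.2 else s) 0
        let cap := pyCapitalize L
        let preferred := if d.getD cap 0 ≥ d.getD L 0 then cap else L
        (seen, acc.2.insert preferred total))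
    (PySem.Set.ofList [], PySem.Dict.empty)
  final.2.items

-- ===== PRECONDITION & SPEC =====
-- Pre_ excludes association lists with duplicate keys: a Python dict argument always has
-- unique keys, so such lists do not represent any input of A.
def Pre_consolidate_counts (words : List (String × Int)) : Prop :=
  (words.map Prod.fst).Nodup
instance (words : List (String × Int)) : Decidable (Pre_consolidate_counts words) := by unfold Pre_consolidate_counts; infer_instance

def pvWitness_consolidate_counts : (List (String × Int)) := [("Apple", 2), ("apple", 1), ("pear!", 3)]

def Spec_consolidate_counts (words : List (String × Int)) (out : List (String × Int)) : Prop := out = consolidate_counts_alt words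
instance (words : List (String × Int)) (out : List (String × Int)) : Decidable (Spec_consolidate_counts words out) := by unfold Spec_consolidate_counts; infer_instance

-- ===== CLAIM (what is proved, stated in full; the proofs are below) =====
def Claim_equal_consolidate_counts : Prop := ∀ (words : List (String × Int)), Dom_consolidate_counts words → Pre_consolidate_counts words → Spec_consolidate_counts words (consolidate_counts words)


-- ===== LEMMAS AND PROOFS =====

-- ---- character-level facts about PySem's ASCII lower/upper casing ----
theorem pvToNatOfNat (n : Nat) (h : n < 55296) : (Char.ofNat n).toNat = n := by
  unfold Char.ofNat
  split
  · rw [Char.toNat_ofNatAux]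
  · omega

theorem pvIsupperIff (c : Char) : PySem.Chars.isupper c = true ↔ 65 ≤ c.toNat ∧ c.toNat ≤ 90 := by
  simp only [PySem.Chars.isupper, Bool.and_eq_true, decide_eq_true_eq]
  exact ⟨fun h => ⟨h.1, h.2⟩, fun h => ⟨h.1, h.2⟩⟩

theorem pvIslowerIff (c : Char) : PySem.Chars.islower c = true ↔ 97 ≤ c.toNat ∧ c.toNat ≤ 122 := by
  simp only [PySem.Chars.islower, Bool.and_eq_true, decide_eq_true_eq]
  exact ⟨fun h => ⟨h.1, h.2⟩, fun h => ⟨h.1, h.2⟩⟩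

theorem pvLowerCharIdem (c : Char) :
    PySem.Chars.lowerChar (PySem.Chars.lowerChar c) = PySem.Chars.lowerChar c := by
  simp only [PySem.Chars.lowerChar]
  cases hu : PySem.Chars.isupper c with
  | false => simp [hu]
  | true =>
    have hr := (pvIsupperIff c).mp hu
    have ht : (Char.ofNat (c.toNat + 32)).toNat = c.toNat + 32 := pvToNatOfNat _ (by omega)
    have h2 : PySem.Chars.isupper (Char.ofNat (c.toNat + 32)) = false := by
      rw [← Bool.not_eq_true, pvIsupperIff]
      omega
    simp [h2]

theorem pvLowerCharUpper (c : Char) :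
    PySem.Chars.lowerChar (PySem.Chars.upperChar c) = PySem.Chars.lowerChar c := by
  simp only [PySem.Chars.lowerChar, PySem.Chars.upperChar]
  cases hl : PySem.Chars.islower c with
  | false => simp
  | true =>
    have hr := (pvIslowerIff c).mp hl
    have ht : (Char.ofNat (c.toNat - 32)).toNat = c.toNat - 32 := pvToNatOfNat _ (by omega)
    have h2 : PySem.Chars.isupper (Char.ofNat (c.toNat - 32)) = true := by
      rw [pvIsupperIff]
      omega
    have h3 : PySem.Chars.isupper c = false := by
      rw [← Bool.not_eq_true, pvIsupperIff]
      omega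
    have h4 : c.toNat - 32 + 32 = c.toNat := by omega
    simp [h2, h3, ht, h4, Char.ofNat_toNat]

-- ---- string-level casing facts ----
theorem pvCharsLowerIdem (l : List Char) :
    PySem.Chars.lower (PySem.Chars.lower l) = PySem.Chars.lower l := by
  simp only [PySem.Chars.lower, List.map_map]
  exact List.map_congr_left (fun c _ => pvLowerCharIdem c)

theorem pvLowerIdem (s : String) :
    PySem.Str.lower (PySem.Str.lower s) = PySem.Str.lower s := by
  simp only [PySem.Str.lower, String.toList_ofList, pvCharsLowerIdem]

theorem pvLowerCap (s : String) :
    PySem.Str.lower (pyCapitalize s) = PySem.Str.lower s := by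
  rw [pyCapitalize]
  cases h : s.toList with
  | nil =>
    simp only [PySem.Str.lower, h]
    congr 1
  | cons c cs =>
    simp only [PySem.Str.lower, String.toList_ofList, h, PySem.Chars.lower, List.map_map,
      List.map_cons]
    simp [Function.comp_def, pvLowerCharIdem, pvLowerCharUpper]

-- the preferred form chosen for a lowercase key L (both ports compute exactly this)
def pvPref (d : PySem.Dict String Int) (L : String) : String :=
  if d.getD (pyCapitalize L) 0 ≥ d.getD L 0 then pyCapitalize L else L

theorem pvLowerPref (d : PySem.Dict String Int) (L : String) (h : PySem.Str.lower L = L) :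
    PySem.Str.lower (pvPref d L) = L := by
  rw [pvPref]
  split
  · rw [pvLowerCap, h]
  · exact h

theorem pvPrefInj (d : PySem.Dict String Int) (L1 L2 : String)
    (h1 : PySem.Str.lower L1 = L1) (h2 : PySem.Str.lower L2 = L2)
    (h : pvPref d L1 = pvPref d L2) : L1 = L2 := by
  have := congrArg PySem.Str.lower h
  rwa [pvLowerPref d L1 h1, pvLowerPref d L2 h2] at this

-- ---- generic fold lemmas ----
-- A's accumulate loop: the final count at K is the sum of the matching entries
theorem pvGetDGroupSum {α β : Type} [BEq β] [LawfulBEq β] (l : List (α × Int)) (k : α → β)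
    (dd : PySem.Dict β Int) (K : β) :
    (l.foldl (fun cc p => cc.insert (k p.1) (cc.getD (k p.1) 0 + p.2)) dd).getD K 0
      = dd.getD K 0 + ((l.filter (fun p => k p.1 == K)).map Prod.snd).sum := by
  induction l generalizing dd with
  | nil => simp
  | cons p t ih =>
    rw [List.foldl_cons, ih]
    by_cases h : k p.1 = K
    · have hb : (k p.1 == K) = true := by simp [h]
      simp only [List.filter_cons, hb, if_true, List.map_cons, List.sum_cons]
      rw [← h, PySem.Dict.getD_insert_self]
      ring
    · have hb : (k p.1 == K) = false := by simp [h]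
      simp only [List.filter_cons, hb, Bool.false_eq_true, if_false]
      rw [PySem.Dict.getD_insert_of_ne _ _ _ (fun e => h e.symm)]

-- B's conditional sum loop equals the filtered sum
theorem pvCondSum (l : List (String × Int)) (L : String) (a : Int) :
    l.foldl (fun s x => if PySem.Str.lower x.1 == L then s + x.2 else s) a
      = a + ((l.filter (fun p => PySem.Str.lower p.1 == L)).map Prod.snd).sum := by
  induction l generalizing a with
  | nil => simp
  | cons p t ih =>
    rw [List.foldl_cons]
    by_cases h : PySem.Str.lower p.1 = L
    · have hb : (PySem.Str.lower p.1 == L) = true := by simp [h]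
      simp only [hb, if_true, List.filter_cons, List.map_cons, List.sum_cons, ih]
      ring
    · have hb : (PySem.Str.lower p.1 == L) = false := by simp [h]
      simp only [hb, Bool.false_eq_true, if_false, List.filter_cons, ih]

-- set-of-mapped-list commutes with the map when the function is injective on the elements
theorem pvFoldAddMapInj {α : Type} [BEq α] [LawfulBEq α] (l : List α) (s : List α) (f : α → α)
    (hinj : ∀ x, ∀ y, (x ∈ l ∨ x ∈ s) → (y ∈ l ∨ y ∈ s) → f x = f y → x = y) :
    (l.map f).foldl PySem.Set.add (s.map f) = ((l.foldl PySem.Set.add s).map f) := by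
  induction l generalizing s with
  | nil => simp
  | cons a t ih =>
    simp only [List.map_cons, List.foldl_cons]
    have hc : PySem.Set.contains (s.map f) (f a) = PySem.Set.contains s a := by
      simp only [PySem.Set.contains]
      by_cases hm : a ∈ s
      · simp [hm, List.mem_map.mpr ⟨a, hm, rfl⟩]
      · have : ¬ f a ∈ s.map f := by
          rintro hfm
          rcases List.mem_map.mp hfm with ⟨y, hy, hfy⟩
          exact hm ((hinj y a (Or.inr hy) (Or.inl (List.mem_cons_self)) hfy) ▸ hy)
        simp [hm, this]
    by_cases hm : PySem.Set.contains s a = true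
    · rw [PySem.Set.add, PySem.Set.add, hc, if_pos hm, if_pos hm]
      exact ih s (fun x y hx hy =>
        hinj x y (hx.imp (List.mem_cons_of_mem a) id) (hy.imp (List.mem_cons_of_mem a) id))
    · rw [PySem.Set.add, PySem.Set.add, hc, if_neg hm, if_neg hm]
      rw [show s.map f ++ [f a] = (s ++ [a]).map f by simp]
      refine ih (s ++ [a]) (fun x y hx hy => hinj x y ?_ ?_)
      · rcases hx with hx | hx
        · exact Or.inl (List.mem_cons_of_mem a hx)
        · rcases List.mem_append.mp hx with hx | hx
          · exact Or.inr hx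
          · exact Or.inl (by simp at hx; simp [hx])
      · rcases hy with hy | hy
        · exact Or.inl (List.mem_cons_of_mem a hy)
        · rcases List.mem_append.mp hy with hy | hy
          · exact Or.inr hy
          · exact Or.inl (by simp at hy; simp [hy])

theorem pvSetMapInj {α : Type} [BEq α] [LawfulBEq α] (l : List α) (f : α → α)
    (hinj : ∀ x ∈ l, ∀ y ∈ l, f x = f y → x = y) :
    PySem.Set.ofList (l.map f) = (PySem.Set.ofList l).map f := by
  have := pvFoldAddMapInj l [] f (by
    intro x y hx hy
    simp only [List.not_mem_nil, or_false] at hx hy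
    exact hinj x hx y hy)
  simpa [PySem.Set.ofList] using this

-- the common canonical value both ports compute
def pvCanon (words : List (String × Int)) : List (String × Int) :=
  (PySem.Set.ofList (words.map (fun p => PySem.Str.lower p.1))).map
    (fun L => (pvPref (PySem.Dict.mk words) L,
      ((words.filter (fun p => PySem.Str.lower p.1 == L)).map Prod.snd).sum))

-- the per-key value A's preferred_forms loop stores (before knowing the key is lowered)
def pvPrefA (d : PySem.Dict String Int) (w : String) : String :=
  if d.getD (pyCapitalize w) 0 ≥ d.getD (PySem.Str.lower w) 0 then pyCapitalize w
  else PySem.Str.lower w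

theorem pvPrefA_lowered (d : PySem.Dict String Int) (L : String)
    (h : PySem.Str.lower L = L) : pvPrefA d L = pvPref d L := by
  rw [pvPrefA, pvPref, h]

-- A's preferred_forms dict, characterised
theorem pvPrefFormsItems (words : List (String × Int)) :
    (List.foldl
      (fun pf wc =>
        if (PySem.Dict.mk words).getD (pyCapitalize wc.1) 0 ≥
            (PySem.Dict.mk words).getD (PySem.Str.lower wc.1) 0 then
          pf.insert wc.1 (pyCapitalize wc.1)
        else pf.insert wc.1 (PySem.Str.lower wc.1))
      PySem.Dict.empty
      (PySem.Dict.counter (words.map (fun p => PySem.Str.lower p.1))).items).items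
    = (PySem.Set.ofList (words.map (fun p => PySem.Str.lower p.1))).map
        (fun L => (L, pvPrefA (PySem.Dict.mk words) L)) := by
  rw [PySem.List.foldl_congr_mem _ _
    (fun pf (wc : String × Int) => pf.insert wc.1 (pvPrefA (PySem.Dict.mk words) wc.1)) _
    (by
      intro acc x _
      by_cases h : (PySem.Dict.mk words).getD (pyCapitalize x.1) 0 ≥
          (PySem.Dict.mk words).getD (PySem.Str.lower x.1) 0 <;>
        simp [pvPrefA, h])]
  rw [PySem.Dict.items_foldl_insert_fresh _ (fun wc : String × Int => wc.1)
    (fun wc => pvPrefA (PySem.Dict.mk words) wc.1) _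
    (by intro a _; exact PySem.Dict.contains_empty _)
    (by
      rw [PySem.Dict.items_counter, List.map_map]
      simp [Function.comp_def, PySem.Set.nodup_ofList])]
  rw [PySem.Dict.items_counter, List.map_map]
  simp [Function.comp_def, PySem.Dict.empty]

theorem pvPrefFormsGet (words : List (String × Int)) (L : String)
    (hL : L ∈ words.map (fun p => PySem.Str.lower p.1)) :
    (List.foldl
      (fun pf wc =>
        if (PySem.Dict.mk words).getD (pyCapitalize wc.1) 0 ≥
            (PySem.Dict.mk words).getD (PySem.Str.lower wc.1) 0 then
          pf.insert wc.1 (pyCapitalize wc.1)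
        else pf.insert wc.1 (PySem.Str.lower wc.1))
      PySem.Dict.empty
      (PySem.Dict.counter (words.map (fun p => PySem.Str.lower p.1))).items).get? L
    = some (pvPrefA (PySem.Dict.mk words) L) := by
  have hnd : (List.foldl
      (fun pf wc =>
        if (PySem.Dict.mk words).getD (pyCapitalize wc.1) 0 ≥
            (PySem.Dict.mk words).getD (PySem.Str.lower wc.1) 0 then
          pf.insert wc.1 (pyCapitalize wc.1)
        else pf.insert wc.1 (PySem.Str.lower wc.1))
      PySem.Dict.empty
      (PySem.Dict.counter (words.map (fun p => PySem.Str.lower p.1))).items).keys.Nodup := by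
    simp only [PySem.Dict.keys, pvPrefFormsItems, List.map_map]
    simp [Function.comp_def, PySem.Set.nodup_ofList]
  rw [PySem.Dict.get?_eq_some_iff_mem_items _ _ _ hnd, pvPrefFormsItems]
  exact List.mem_map.mpr ⟨L, (PySem.Set.mem_ofList _ _).mpr hL, rfl⟩

theorem pvMemLowered (words : List (String × Int)) (L : String)
    (hL : L ∈ words.map (fun p => PySem.Str.lower p.1)) : PySem.Str.lower L = L := by
  rcases List.mem_map.mp hL with ⟨p, _, rfl⟩
  exact pvLowerIdem p.1

theorem pvA_eq_canon (words : List (String × Int))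
    (_hnd : (words.map Prod.fst).Nodup) :
    consolidate_counts words = pvCanon words := by
  simp only [consolidate_counts]
  rw [PySem.List.foldl_congr_mem _ _
    (fun cc (p : String × Int) =>
      cc.insert (pvPref (PySem.Dict.mk words) (PySem.Str.lower p.1))
        (cc.getD (pvPref (PySem.Dict.mk words) (PySem.Str.lower p.1)) 0 + p.2)) _
    (by
      intro acc p hp
      rw [pvPrefFormsGet words (PySem.Str.lower p.1) (List.mem_map.mpr ⟨p, hp, rfl⟩),
        Option.getD_some, pvPrefA_lowered _ _ (pvLowerIdem p.1)])]
  have hk : (List.foldl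
      (fun cc (p : String × Int) =>
        cc.insert (pvPref (PySem.Dict.mk words) (PySem.Str.lower p.1))
          (cc.getD (pvPref (PySem.Dict.mk words) (PySem.Str.lower p.1)) 0 + p.2))
      PySem.Dict.empty words).keys.Nodup := by
    apply PySem.Dict.nodup_keys_foldl_insert_key words
      (fun p => pvPref (PySem.Dict.mk words) (PySem.Str.lower p.1))
      (fun cc p => cc.getD (pvPref (PySem.Dict.mk words) (PySem.Str.lower p.1)) 0 + p.2)
    exact PySem.Dict.nodup_keys_empty
  rw [PySem.Dict.items_eq_map_keys _ hk 0]
  rw [PySem.Dict.keys_foldl_insert_key words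
    (fun p => pvPref (PySem.Dict.mk words) (PySem.Str.lower p.1))
    (fun cc p => cc.getD (pvPref (PySem.Dict.mk words) (PySem.Str.lower p.1)) 0 + p.2)]
  have hupd : PySem.Set.update (PySem.Dict.empty : PySem.Dict String Int).keys
      (words.map (fun p => pvPref (PySem.Dict.mk words) (PySem.Str.lower p.1)))
      = PySem.Set.ofList ((words.map (fun p => PySem.Str.lower p.1)).map
          (pvPref (PySem.Dict.mk words))) := by
    rw [List.map_map]
    rfl
  rw [hupd]
  rw [pvSetMapInj _ _ (by
    intro x hx y hy hxy
    exact pvPrefInj _ _ _ (pvMemLowered words x hx) (pvMemLowered words y hy) hxy)]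
  rw [List.map_map]
  apply List.map_congr_left
  intro L hL
  have hLlow : PySem.Str.lower L = L :=
    pvMemLowered words L ((PySem.Set.mem_ofList _ _).mp hL)
  simp only [Function.comp_def]
  rw [pvGetDGroupSum words (fun w => pvPref (PySem.Dict.mk words) (PySem.Str.lower w))
    PySem.Dict.empty (pvPref (PySem.Dict.mk words) L)]
  rw [PySem.Dict.getD_empty, zero_add]
  have hfe : words.filter
      (fun p => pvPref (PySem.Dict.mk words) (PySem.Str.lower p.1) ==
        pvPref (PySem.Dict.mk words) L)
      = words.filter (fun p => PySem.Str.lower p.1 == L) := by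
    apply List.filter_congr
    intro p hp
    by_cases he : PySem.Str.lower p.1 = L
    · simp [he]
    · have hne : pvPref (PySem.Dict.mk words) (PySem.Str.lower p.1) ≠
          pvPref (PySem.Dict.mk words) L :=
        fun hc => he (pvPrefInj _ _ _ (pvLowerIdem p.1) hLlow hc)
      simp [he, hne]
  rw [hfe]

-- ---- B-side: the seen-set fold visits exactly the fresh lowercase forms, in order ----
-- B's loop body, named for the proofs (the port inlines it)
def pvStep (words : List (String × Int))
    (acc : PySem.Set String × PySem.Dict String Int) (w : String × Int) :
    PySem.Set String × PySem.Dict String Int :=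
  let L := PySem.Str.lower w.1
  if PySem.Set.contains acc.1 L then acc
  else
    (PySem.Set.add acc.1 L,
      acc.2.insert (pvPref (PySem.Dict.mk words) L)
        (words.foldl (fun s x => if PySem.Str.lower x.1 == L then s + x.2 else s) 0))

theorem pvAltStep (words : List (String × Int)) :
    consolidate_counts_alt words
      = (words.foldl (pvStep words) (PySem.Set.ofList [], PySem.Dict.empty)).2.items := rfl

-- the lowercase forms the loop has not seen yet, in first-occurrence order
def pvNewKeys : List (String × Int) → PySem.Set String → List String
  | [], _ => []
  | w :: t, s =>
    let L := PySem.Str.lower w.1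
    if PySem.Set.contains s L then pvNewKeys t s
    else L :: pvNewKeys t (PySem.Set.add s L)

theorem pvFoldStepSnd (words l : List (String × Int)) (s : PySem.Set String)
    (r : PySem.Dict String Int) :
    (l.foldl (pvStep words) (s, r)).2
      = (pvNewKeys l s).foldl
          (fun rr L => rr.insert (pvPref (PySem.Dict.mk words) L)
            (words.foldl (fun a x => if PySem.Str.lower x.1 == L then a + x.2 else a) 0)) r := by
  induction l generalizing s r with
  | nil => simp [pvNewKeys]
  | cons w t ih =>
    rw [List.foldl_cons, pvNewKeys]
    by_cases h : PySem.Set.contains s (PySem.Str.lower w.1) = true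
    · simp only [pvStep, h, if_true]
      exact ih s r
    · simp only [pvStep, h, Bool.false_eq_true, if_false, List.foldl_cons]
      exact ih _ _

theorem pvNewKeysUpdate (l : List (String × Int)) (s : PySem.Set String) :
    s ++ pvNewKeys l s = PySem.Set.update s (l.map (fun p => PySem.Str.lower p.1)) := by
  induction l generalizing s with
  | nil => simp [pvNewKeys, PySem.Set.update]
  | cons w t ih =>
    rw [pvNewKeys, List.map_cons]
    by_cases h : PySem.Set.contains s (PySem.Str.lower w.1) = true
    · have hm := (PySem.Set.contains_iff _ _).mp h
      have hadd : PySem.Set.add s (PySem.Str.lower w.1) = s := by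
        simp [PySem.Set.add, hm]
      simp only [h, if_true, PySem.Set.update, List.foldl_cons, hadd]
      exact ih s
    · have hm : PySem.Str.lower w.1 ∉ s := fun hm => h (((PySem.Set.contains_iff _ _).mpr hm))
      have hadd : PySem.Set.add s (PySem.Str.lower w.1) = s ++ [PySem.Str.lower w.1] := by
        simp [PySem.Set.add, hm]
      simp only [h, Bool.false_eq_true, if_false, PySem.Set.update, List.foldl_cons, hadd]
      rw [show s ++ PySem.Str.lower w.1 :: pvNewKeys t (s ++ [PySem.Str.lower w.1])
        = (s ++ [PySem.Str.lower w.1]) ++ pvNewKeys t (s ++ [PySem.Str.lower w.1]) by simp]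
      rw [← hadd]
      exact ih _

theorem pvNewKeysNil (l : List (String × Int)) :
    pvNewKeys l (PySem.Set.ofList [])
      = PySem.Set.ofList (l.map (fun p => PySem.Str.lower p.1)) := by
  have h := pvNewKeysUpdate l (PySem.Set.ofList [])
  simpa [PySem.Set.ofList, PySem.Set.update] using h

theorem pvB_eq_canon (words : List (String × Int))
    (_hnd : (words.map Prod.fst).Nodup) :
    consolidate_counts_alt words = pvCanon words := by
  rw [pvAltStep, pvFoldStepSnd, pvNewKeysNil]
  rw [PySem.Dict.items_foldl_insert_fresh _
    (fun L : String => pvPref (PySem.Dict.mk words) L)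
    (fun L => words.foldl (fun a x => if PySem.Str.lower x.1 == L then a + x.2 else a) 0) _
    (by intro a _; exact PySem.Dict.contains_empty _)
    (by
      apply List.Nodup.map_on
      · intro x hx y hy hxy
        exact pvPrefInj _ _ _ (pvMemLowered words x ((PySem.Set.mem_ofList _ _).mp hx))
          (pvMemLowered words y ((PySem.Set.mem_ofList _ _).mp hy)) hxy
      · exact PySem.Set.nodup_ofList _)]
  rw [show (PySem.Dict.empty : PySem.Dict String Int).items = [] from rfl, List.nil_append]
  apply List.map_congr_left
  intro L _
  rw [pvCondSum words L 0, zero_add]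

-- ===== VERDICT (by name: the statement is the Claim_ definition above) =====
theorem consolidate_counts_spec : Claim_equal_consolidate_counts := by
  intro words _ hpre
  unfold Spec_consolidate_counts
  rw [pvA_eq_canon words hpre, pvB_eq_canon words hpre]
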